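-- pv_equiv track=rewrite | github.com/Anujrk/Artifical-Intelligence | Language detector using Adaboost and DecisionTree/Program/Factors_checking.py | common_dutch_words
-- ===== SOURCE A (Python) =====
-- def common_dutch_words(statement):
--     """
--     Checking if sentence contains common dutch words
--     :param statement:Sentence
--     :return:Boolean value
--     """
--     list = ['met', 'hij', 'over', 'hem', 'weten', 'jouw', 'naar', 'zijn', 'dan', 'ook', 'onze', 'deze', 'ons',
--             'meest','ze', 'wij', 'ze', 'er', 'hun', 'zo', 'be', 'het', 'niet']
--     bool = True
--     words = statement.split()
--     for word in words:
--         if word.lower().replace(',', '') in list or word.lower().replace('.', '') in list: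
--             return bool
--     bool = False
--     return bool
-- ===== SOURCE B (Python) =====
-- def common_dutch_words(statement):
--     """
--     Checking if sentence contains common dutch words
--     :param statement:Sentence
--     :return:Boolean value
--     """
--     dutch = ['met', 'hij', 'over', 'hem', 'weten', 'jouw', 'naar', 'zijn', 'dan', 'ook', 'onze', 'deze', 'ons',
--              'meest', 'ze', 'wij', 'ze', 'er', 'hun', 'zo', 'be', 'het', 'niet']
--     forms = set()
--     for word in statement.split():
--         w = word.lower()
--         forms.add(w.replace(',', ''))
--         forms.add(w.replace('.', ''))
--     return any(dw in forms for dw in dutch)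
-- ===== Notes on version B (the rewrite author's own statement) =====
-- stated objective: alternative
-- what changed: B makes one pass over the sentence to build a set of all cleaned word forms, then checks the fixed Dutch-word list against that index, instead of scanning the 23-word list (twice via 'in') for every word of the sentence with an early return.
import Mathlib
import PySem

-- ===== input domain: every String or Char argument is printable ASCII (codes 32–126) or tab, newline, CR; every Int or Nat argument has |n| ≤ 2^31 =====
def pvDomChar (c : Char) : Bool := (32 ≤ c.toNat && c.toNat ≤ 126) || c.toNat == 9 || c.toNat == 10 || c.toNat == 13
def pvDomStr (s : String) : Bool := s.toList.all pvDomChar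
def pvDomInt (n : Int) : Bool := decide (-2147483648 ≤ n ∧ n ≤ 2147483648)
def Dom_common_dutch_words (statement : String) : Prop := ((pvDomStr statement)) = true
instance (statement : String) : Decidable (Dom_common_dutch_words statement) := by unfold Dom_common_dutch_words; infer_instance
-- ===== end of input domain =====

-- B builds a set of all cleaned word forms in one pass, then checks the fixed Dutch list
-- against that index (alternative decomposition; A scans the list per sentence word).

-- ===== PORT A =====
-- the constant list of common Dutch words (shared spelling of the literal; each port uses it as its Python does)
def cdwList : List String :=
  ["met", "hij", "over", "hem", "weten", "jouw", "naar", "zijn", "dan", "ook", "onze", "deze", "ons",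
   "meest", "ze", "wij", "ze", "er", "hun", "zo", "be", "het", "niet"]

-- word.lower().replace(',', '')  and  word.lower().replace('.', '')
def cdwFormComma (w : String) : String := PySem.Str.replace (PySem.Str.lower w) "," ""
def cdwFormDot (w : String) : String := PySem.Str.replace (PySem.Str.lower w) "." ""

-- the 'for word in words: if … : return True' loop of A
def cdwLoopA : List String → Bool
  | [] => false
  | w :: ws =>
    if cdwList.contains (cdwFormComma w) ∨ cdwList.contains (cdwFormDot w) then true
    else cdwLoopA ws

def common_dutch_words (statement : String) : Bool :=
  cdwLoopA (PySem.Str.split₀ statement)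

-- ===== PORT B =====
-- forms = set(); for word: forms.add(comma-form); forms.add(dot-form)
def cdwForms (words : List String) : PySem.Set String :=
  words.foldl (fun s w =>
    PySem.Set.add (PySem.Set.add s (cdwFormComma w)) (cdwFormDot w)) PySem.Set.empty

def common_dutch_words_alt (statement : String) : Bool :=
  cdwList.any (fun dw => PySem.Set.contains (cdwForms (PySem.Str.split₀ statement)) dw)

-- ===== PRECONDITION & SPEC =====
def Spec_common_dutch_words (statement : String) (out : Bool) : Prop := out = common_dutch_words_alt statement
instance (statement : String) (out : Bool) : Decidable (Spec_common_dutch_words statement out) := by unfold Spec_common_dutch_words; infer_instance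

-- ===== CLAIM (what is proved, stated in full; the proofs are below) =====
def Claim_equal_common_dutch_words : Prop := ∀ (statement : String), Dom_common_dutch_words statement → Spec_common_dutch_words statement (common_dutch_words statement)

-- ===== LEMMAS AND PROOFS =====

-- membership in the accumulated forms set
theorem mem_cdwForms_aux (ws : List String) (init : PySem.Set String) (d : String) :
    d ∈ ws.foldl (fun s w => PySem.Set.add (PySem.Set.add s (cdwFormComma w)) (cdwFormDot w)) init ↔
      d ∈ init ∨ ∃ w ∈ ws, cdwFormComma w = d ∨ cdwFormDot w = d := by
  induction ws generalizing init with
  | nil => simp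
  | cons w ws ih =>
    simp only [List.foldl_cons, ih, PySem.Set.mem_add, List.mem_cons]
    constructor
    · rintro (((h | h) | h) | ⟨x, hx, h⟩)
      · exact Or.inl h
      · exact Or.inr ⟨w, Or.inl rfl, Or.inl h.symm⟩
      · exact Or.inr ⟨w, Or.inl rfl, Or.inr h.symm⟩
      · exact Or.inr ⟨x, Or.inr hx, h⟩
    · rintro (h | ⟨x, (rfl | hx), h⟩)
      · exact Or.inl (Or.inl (Or.inl h))
      · rcases h with h | h
        · exact Or.inl (Or.inl (Or.inr h.symm))
        · exact Or.inl (Or.inr h.symm)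
      · exact Or.inr ⟨x, hx, h⟩

-- A's early-return loop decides the same existential
theorem cdwLoopA_eq_true_iff (ws : List String) :
    cdwLoopA ws = true ↔ ∃ w ∈ ws, cdwFormComma w ∈ cdwList ∨ cdwFormDot w ∈ cdwList := by
  induction ws with
  | nil => simp [cdwLoopA]
  | cons w ws ih =>
    simp only [cdwLoopA, List.mem_cons]
    split_ifs with h
    · simp only [List.contains_eq_mem, decide_eq_true_eq] at h
      exact ⟨fun _ => ⟨w, Or.inl rfl, h⟩, fun _ => rfl⟩
    · simp only [List.contains_eq_mem, decide_eq_true_eq, not_or] at h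
      rw [ih]
      constructor
      · rintro ⟨x, hx, hf⟩; exact ⟨x, Or.inr hx, hf⟩
      · rintro ⟨x, (rfl | hx), hf⟩
        · rcases hf with hf | hf
          · exact absurd hf h.1
          · exact absurd hf h.2
        · exact ⟨x, hx, hf⟩

theorem common_dutch_words_agree (statement : String) :
    common_dutch_words statement = common_dutch_words_alt statement := by
  unfold common_dutch_words common_dutch_words_alt
  set ws := PySem.Str.split₀ statement with hws
  rw [Bool.eq_iff_iff, cdwLoopA_eq_true_iff, List.any_eq_true]
  constructor
  · rintro ⟨w, hw, hf⟩
    rcases hf with hf | hf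
    · refine ⟨cdwFormComma w, hf, ?_⟩
      simp only [PySem.Set.contains, List.contains_eq_mem, decide_eq_true_eq, cdwForms,
        mem_cdwForms_aux]
      exact Or.inr ⟨w, hw, Or.inl rfl⟩
    · refine ⟨cdwFormDot w, hf, ?_⟩
      simp only [PySem.Set.contains, List.contains_eq_mem, decide_eq_true_eq, cdwForms,
        mem_cdwForms_aux]
      exact Or.inr ⟨w, hw, Or.inr rfl⟩
  · rintro ⟨d, hd, hmem⟩
    simp only [PySem.Set.contains, List.contains_eq_mem, decide_eq_true_eq, cdwForms,
      mem_cdwForms_aux] at hmem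
    rcases hmem with h | ⟨w, hw, hf⟩
    · simp [PySem.Set.empty] at h
    · rcases hf with rfl | rfl
      · exact ⟨w, hw, Or.inl hd⟩
      · exact ⟨w, hw, Or.inr hd⟩

-- ===== VERDICT (by name: the statement is the Claim_ definition above) =====
theorem common_dutch_words_spec : Claim_equal_common_dutch_words := by
  intro statement _
  exact common_dutch_words_agree statement
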